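-- pv_equiv track=rewrite | github.com/SadineniAbhi/DSA | aug30codeforces/threesubseq.py | find_count
-- ===== SOURCE A (Python) =====
-- def gcd(a, b):
--     while b:
--         a, b = b, a % b
--     return a
--
-- def find_count(low, high):
--     count = 0
--     for a in range(low, high + 1):
--         for b in range(low, high + 1):
--             for c in range(low, high + 1):
--                 if gcd(a,b) == gcd(b,c) == gcd(a,c):
--                     count+=1
--     return count
-- ===== SOURCE B (Python) =====
-- def gcd(a, b):
--     while b:
--         a, b = b, a % b
--     return a
--
-- def find_count(low, high):
--     rng = range(low, high + 1)
--     total = 0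
--     for a in rng:
--         # partition b-range into groups sharing g = gcd(a, b); a valid triple needs
--         # b and c in the same group and gcd(b, c) equal to that group's g
--         for g in dict.fromkeys(gcd(a, b) for b in rng):
--             members = [b for b in rng if gcd(a, b) == g]
--             for b in members:
--                 for c in members:
--                     if gcd(b, c) == g:
--                         total += 1
--     return total
-- ===== Notes on version B (the rewrite author's own statement) =====
-- stated objective: alternative
-- what changed: For each a, B partitions the b-range into groups sharing g = gcd(a,b) (distinct g values via dict.fromkeys) and enumerates only pairs b,c inside the same group, checking the single remaining condition gcd(b,c) == g; A tests all n^2 (b,c) pairs with three gcd computations per triple.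
import Mathlib
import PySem

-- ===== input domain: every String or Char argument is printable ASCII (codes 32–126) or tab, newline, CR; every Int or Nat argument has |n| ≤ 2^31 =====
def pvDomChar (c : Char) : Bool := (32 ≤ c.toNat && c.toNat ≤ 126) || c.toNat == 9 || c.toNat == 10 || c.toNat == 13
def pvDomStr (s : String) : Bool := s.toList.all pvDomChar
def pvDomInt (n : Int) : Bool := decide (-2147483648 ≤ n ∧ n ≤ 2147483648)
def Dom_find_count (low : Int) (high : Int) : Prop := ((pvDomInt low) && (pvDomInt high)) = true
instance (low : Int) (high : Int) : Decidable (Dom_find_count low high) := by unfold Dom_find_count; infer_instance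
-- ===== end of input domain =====

-- B partitions, for each a, the b-range into groups sharing g = gcd(a,b) and pairs b,c only
-- inside the same group (objective: alternative — a group-by traversal with the same return value).

-- Python's `%`-based Euclid step shrinks |b|: termination helper for the gcd port, cited by name in `decreasing_by`
theorem pymod_natAbs_lt (a : Int) {b : Int} (hb : b ≠ 0) :
    (PySem.Int.mod a b).natAbs < b.natAbs := by
  rcases lt_or_gt_of_ne hb with h | h
  · have := PySem.Int.mod_neg_bounds a h; omega
  · have h1 := PySem.Int.mod_nonneg a h; have h2 := PySem.Int.mod_lt a h; omega

-- the helper `gcd` of both Pythons (Euclid with Python's floor-sign `%`)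
def pygcd (a b : Int) : Int :=
  if _h : b = 0 then a else pygcd b (PySem.Int.mod a b)
termination_by b.natAbs
decreasing_by exact pymod_natAbs_lt a _h

-- ===== PORT A =====
def find_count (low : Int) (high : Int) : Int :=
  (PySem.List.pyRange low (high + 1) 1).foldl (fun count a =>
    (PySem.List.pyRange low (high + 1) 1).foldl (fun count b =>
      (PySem.List.pyRange low (high + 1) 1).foldl (fun count c =>
        if pygcd a b = pygcd b c ∧ pygcd b c = pygcd a c then count + 1 else count)
        count) count) 0

-- ===== PORT B =====
def find_count_alt (low : Int) (high : Int) : Int :=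
  let rng := PySem.List.pyRange low (high + 1) 1
  rng.foldl (fun total a =>
    (PySem.List.dedup (rng.map (fun b => pygcd a b))).foldl (fun total g =>
      let members := rng.filter (fun b => pygcd a b == g)
      members.foldl (fun total b =>
        members.foldl (fun total c =>
          if pygcd b c = g then total + 1 else total) total) total) total) 0

-- ===== PRECONDITION & SPEC =====
def Spec_find_count (low : Int) (high : Int) (out : Int) : Prop := out = find_count_alt low high
instance (low : Int) (high : Int) (out : Int) : Decidable (Spec_find_count low high out) := by unfold Spec_find_count; infer_instance

-- ===== CLAIM (what is proved, stated in full; the proofs are below) =====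
def Claim_equal_find_count : Prop := ∀ (low : Int) (high : Int), Dom_find_count low high → Spec_find_count low high (find_count low high)

-- ===== LEMMAS AND PROOFS =====

-- summing 'if x == g then A g + B g else B g' over a nodup list containing x picks A x exactly once
theorem sum_pick_once (K : List Int) (hnd : K.Nodup) (x : Int) (hx : x ∈ K)
    (A B : Int → Int) :
    (K.map (fun g => if x = g then A g + B g else B g)).sum = A x + (K.map B).sum := by
  induction K with
  | nil => cases hx
  | cons g K ih =>
    rcases List.mem_cons.mp hx with h | h
    · subst h
      have hnotin : x ∉ K := (List.nodup_cons.mp hnd).1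
      have : K.map (fun g => if x = g then A g + B g else B g) = K.map B := by
        refine List.map_congr_left (fun g hg => ?_)
        rw [if_neg (fun he => hnotin (by rw [he]; exact hg))]
      simp [this]; ring
    · have hne : x ≠ g := fun he => (List.nodup_cons.mp hnd).1 (he ▸ h)
      simp only [List.map_cons, List.sum_cons, if_neg hne,
        ih (List.nodup_cons.mp hnd).2 h]
      ring

-- grouping a sum over l by the key k: the per-group sums over fibers add up to the plain sum
theorem sum_regroup (k : Int → Int) (F : Int → Int → Int) (K : List Int) (hnd : K.Nodup) :
    ∀ l : List Int, (∀ b ∈ l, k b ∈ K) →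
    (K.map (fun g => ((l.filter (fun b => k b == g)).map (fun b => F g b)).sum)).sum
      = (l.map (fun b => F (k b) b)).sum := by
  intro l
  induction l with
  | nil => simp
  | cons b tl ih =>
    intro hmem
    have hb : k b ∈ K := hmem b (List.mem_cons_self ..)
    have htl : ∀ x ∈ tl, k x ∈ K := fun x hx => hmem x (List.mem_cons_of_mem _ hx)
    have hstep : K.map (fun g => (((b :: tl).filter (fun b => k b == g)).map (fun b => F g b)).sum)
        = K.map (fun g => if k b = g then F g b + ((tl.filter (fun x => k x == g)).map (fun x => F g x)).sum
                          else ((tl.filter (fun x => k x == g)).map (fun x => F g x)).sum) := by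
      refine List.map_congr_left (fun g _ => ?_)
      by_cases h : k b = g
      · simp [h]
      · simp [beq_eq_false_iff_ne.mpr h, h]
    rw [hstep, sum_pick_once K hnd (k b) hb
      (fun g => F g b)
      (fun g => ((tl.filter (fun x => k x == g)).map (fun x => F g x)).sum), ih htl]
    simp

-- the two per-a bodies agree: grouping by g = gcd(a,b) preserves the count
theorem body_eq (low high a t : Int) :
    (PySem.List.pyRange low (high + 1) 1).foldl (fun count b =>
      (PySem.List.pyRange low (high + 1) 1).foldl (fun count c =>
        if pygcd a b = pygcd b c ∧ pygcd b c = pygcd a c then count + 1 else count)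
        count) t
    = (PySem.List.dedup ((PySem.List.pyRange low (high + 1) 1).map (fun b => pygcd a b))).foldl (fun total g =>
        let members := (PySem.List.pyRange low (high + 1) 1).filter (fun b => pygcd a b == g)
        members.foldl (fun total b =>
          members.foldl (fun total c =>
            if pygcd b c = g then total + 1 else total) total) total) t := by
  set rng := PySem.List.pyRange low (high + 1) 1 with hrng
  set K := PySem.List.dedup (rng.map (fun b => pygcd a b)) with hK
  -- normalise both sides to t + a sum
  have hA : rng.foldl (fun count b =>
      rng.foldl (fun count c =>
        if pygcd a b = pygcd b c ∧ pygcd b c = pygcd a c then count + 1 else count)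
        count) t
      = t + (rng.map (fun b =>
          (rng.countP (fun c => decide (pygcd a b = pygcd b c ∧ pygcd b c = pygcd a c)) : Int))).sum := by
    simp only [PySem.List.foldl_ite_add_one]
    rw [PySem.List.foldl_add]
  have hB : K.foldl (fun total g =>
      let members := rng.filter (fun b => pygcd a b == g)
      members.foldl (fun total b =>
        members.foldl (fun total c =>
          if pygcd b c = g then total + 1 else total) total) total) t
      = t + (K.map (fun g =>
          (((rng.filter (fun b => pygcd a b == g)).map (fun b =>
            ((rng.filter (fun x => pygcd a x == g)).countP (fun c => decide (pygcd b c = g)) : Int))).sum))).sum := by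
    simp only [PySem.List.foldl_ite_add_one]
    simp only [PySem.List.foldl_add]
  rw [hA, hB]
  congr 1
  rw [sum_regroup (fun b => pygcd a b)
      (fun g b => ((rng.filter (fun x => pygcd a x == g)).countP (fun c => decide (pygcd b c = g)) : Int))
      K (hK ▸ PySem.List.nodup_dedup _) rng
      (fun b hb => hK ▸ (PySem.List.mem_dedup ..).mpr (List.mem_map_of_mem hb))]
  refine congrArg List.sum (List.map_congr_left (fun b _ => ?_))
  congr 1
  rw [List.countP_filter]
  refine List.countP_congr (fun c _ => ?_)
  simp only [Bool.and_eq_true, decide_eq_true_iff, beq_iff_eq]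
  constructor
  · rintro ⟨h1, h2⟩; exact ⟨h1.symm, (h1.trans h2).symm⟩
  · rintro ⟨h1, h2⟩; exact ⟨h1.symm, h1.trans h2.symm⟩

-- ===== VERDICT (by name: the statement is the Claim_ definition above) =====
theorem find_count_spec : Claim_equal_find_count := by
  intro low high _
  unfold Spec_find_count find_count find_count_alt
  simp only []
  apply PySem.List.foldl_congr_mem
  intro t a _
  exact body_eq low high a t
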